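-- pv_equiv track=rewrite | github.com/Boostcamp-Study/Algorithm_Study | week3/5430_jhuni17.py | solution
-- ===== SOURCE A (Python) =====
-- from collections import deque
--
-- def solution(p, n, arr):
--     arr = deque(arr)
--     flag = 1
--     for func in p:
--         if func == 'R':
--             flag *= -1
--         else:
--             if not arr:
--                 return 'error'
--             if flag == 1:
--                 arr.popleft()
--             else:
--                 arr.pop()
--
--     if flag == 1:
--         return '['+','.join(map(str, list(arr)))+']'
--     else:
--         return '['+','.join(map(str, list(reversed(arr))))+']'
-- ===== SOURCE B (Python) =====
-- def solution(p, n, arr):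
--     flag = 1
--     front = 0
--     back = 0
--     for c in p:
--         if c == 'R':
--             flag = -flag
--         elif flag == 1:
--             front += 1
--         else:
--             back += 1
--     if front + back > len(arr):
--         return 'error'
--     window = arr[front:len(arr)-back]
--     if flag == -1:
--         window.reverse()
--     return '[' + ','.join(map(str, window)) + ']'
-- ===== Notes on version B (the rewrite author's own statement) =====
-- stated objective: simpler
-- what changed: Instead of simulating a deque and popping one element per D command, B makes one pass over p counting only front/back deletions and the flip parity, then takes a single slice of arr (reversed iff the final flag is -1).
import Mathlib
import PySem

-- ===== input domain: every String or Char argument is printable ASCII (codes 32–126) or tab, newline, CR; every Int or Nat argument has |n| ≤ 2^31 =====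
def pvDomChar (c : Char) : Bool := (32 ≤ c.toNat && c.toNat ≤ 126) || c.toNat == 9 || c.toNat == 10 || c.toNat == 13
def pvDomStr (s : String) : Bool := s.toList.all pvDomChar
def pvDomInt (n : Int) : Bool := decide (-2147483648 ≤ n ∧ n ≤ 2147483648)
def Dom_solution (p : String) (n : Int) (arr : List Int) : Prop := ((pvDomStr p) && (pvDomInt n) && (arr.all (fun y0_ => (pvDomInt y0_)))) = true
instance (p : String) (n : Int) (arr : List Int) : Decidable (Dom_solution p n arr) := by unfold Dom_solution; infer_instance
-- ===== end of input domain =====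

-- B replaces A's per-command deque popping by one counting pass over p and a single slice of arr.

-- ===== PORT A =====
-- A's for-loop over p with the deque state: popleft = tail, pop = dropLast; none = 'return error'.
def solLoopA : List Char → List Int → Int → Option (List Int × Int)
  | [], arr, flag => some (arr, flag)
  | c :: cs, arr, flag =>
    if c = 'R' then solLoopA cs arr (flag * -1)
    else if arr = [] then none
    else if flag = 1 then solLoopA cs arr.tail flag
    else solLoopA cs arr.dropLast flag

-- A's final formatting: '[' + ','.join(map(str, …)) + ']', reversed when flag = -1
def solFmtA : Option (List Int × Int) → String
  | none => "error"
  | some (a, flag) =>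
    if flag = 1 then "[" ++ PySem.Str.join "," (a.map PySem.Int.toStr) ++ "]"
    else "[" ++ PySem.Str.join "," (a.reverse.map PySem.Int.toStr) ++ "]"

def solution (p : String) (n : Int) (arr : List Int) : String :=
  solFmtA (solLoopA p.toList arr 1)

-- ===== PORT B =====
-- B's counting pass: final flag, front deletions (flag = 1), back deletions (flag = -1).
def solScanB : List Char → Int → Nat → Nat → Int × Nat × Nat
  | [], flag, front, back => (flag, front, back)
  | c :: cs, flag, front, back =>
    if c = 'R' then solScanB cs (-flag) front back
    else if flag = 1 then solScanB cs flag (front + 1) back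
    else solScanB cs flag front (back + 1)

def solution_alt (p : String) (n : Int) (arr : List Int) : String :=
  match solScanB p.toList 1 0 0 with
  | (flag, front, back) =>
    if arr.length < front + back then "error"
    else
      let window := PySem.List.slice arr (some (front : Int)) (some ((arr.length - back : Nat) : Int))
      let window := if flag = -1 then window.reverse else window
      "[" ++ PySem.Str.join "," (window.map PySem.Int.toStr) ++ "]"

-- ===== PRECONDITION & SPEC =====
def Spec_solution (p : String) (n : Int) (arr : List Int) (out : String) : Prop := out = solution_alt p n arr
instance (p : String) (n : Int) (arr : List Int) (out : String) : Decidable (Spec_solution p n arr out) := by unfold Spec_solution; infer_instance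

-- ===== CLAIM (what is proved, stated in full; the proofs are below) =====
def Claim_equal_solution : Prop := ∀ (p : String) (n : Int) (arr : List Int), Dom_solution p n arr → Spec_solution p n arr (solution p n arr)

-- ===== LEMMAS AND PROOFS =====

-- scan's accumulators just shift the result
lemma solScanB_shift (cs : List Char) (f : Int) (fr bk : Nat) :
    solScanB cs f fr bk =
      ((solScanB cs f 0 0).1, fr + (solScanB cs f 0 0).2.1, bk + (solScanB cs f 0 0).2.2) := by
  induction cs generalizing f fr bk with
  | nil => simp [solScanB]
  | cons c cs ih =>
    simp only [solScanB]
    split_ifs with h1 h2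
    · rw [ih (-f) fr bk, ih (-f) 0 0]
    · rw [ih f (fr+1) bk, ih f 1 0]
      simp only [Prod.mk.injEq]
      refine ⟨by simp, by omega, by omega⟩
    · rw [ih f fr (bk+1), ih f 0 1]
      simp only [Prod.mk.injEq]
      refine ⟨by simp, by omega, by omega⟩

lemma solScanB_flag (cs : List Char) (f : Int) (fr bk : Nat) :
    (solScanB cs f fr bk).1 = f ∨ (solScanB cs f fr bk).1 = -f := by
  induction cs generalizing f fr bk with
  | nil => simp [solScanB]
  | cons c cs ih =>
    simp only [solScanB]
    split_ifs with h1 h2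
    · rcases ih (-f) fr bk with h | h <;> simp [h]
    · exact ih f (fr+1) bk
    · exact ih f fr (bk+1)

-- main invariant: A's deque loop computes the counts-and-slice answer
lemma solLoopA_eq (cs : List Char) (arr : List Int) (f : Int) :
    solLoopA cs arr f =
      (if arr.length < (solScanB cs f 0 0).2.1 + (solScanB cs f 0 0).2.2 then none
       else some ((arr.drop (solScanB cs f 0 0).2.1).take
                    (arr.length - (solScanB cs f 0 0).2.1 - (solScanB cs f 0 0).2.2),
                  (solScanB cs f 0 0).1)) := by
  induction cs generalizing arr f with
  | nil => simp [solLoopA, solScanB]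
  | cons c cs ih =>
    by_cases hR : c = 'R'
    · have hs : solScanB (c :: cs) f 0 0 = solScanB cs (-f) 0 0 := by
        simp [solScanB, hR]
      have hl : solLoopA (c :: cs) arr f = solLoopA cs arr (-f) := by
        simp only [solLoopA, if_pos hR]
        rw [show f * -1 = -f by ring]
      rw [hl, hs, ih]
    · rcases hS : solScanB cs f 0 0 with ⟨g, a, b⟩
      by_cases hf : f = 1
      · have hs : solScanB (c :: cs) f 0 0 = (g, 1 + a, b) := by
          rw [show solScanB (c :: cs) f 0 0 = solScanB cs f 1 0 from by
            simp [solScanB, hR, hf]]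
          rw [solScanB_shift, hS]
          simp
        rw [hs]
        cases arr with
        | nil =>
          have hl : solLoopA (c :: cs) [] f = none := by simp [solLoopA, hR]
          rw [hl, if_pos (by simp only [List.length_nil]; omega)]
        | cons x rest =>
          have hl : solLoopA (c :: cs) (x :: rest) f = solLoopA cs rest f := by
            simp [solLoopA, hR, hf, List.tail]
          rw [hl, ih, hS]
          dsimp only
          by_cases hc : rest.length < a + b
          · rw [if_pos hc, if_pos (by simp only [List.length_cons]; omega)]
          · rw [if_neg hc, if_neg (by simp only [List.length_cons]; omega)]
            have e1 : (x :: rest).drop (1 + a) = rest.drop a := by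
              rw [Nat.add_comm 1 a]; simp
            have e2 : (x :: rest).length - (1 + a) - b = rest.length - a - b := by
              simp; omega
            rw [e1, e2]
      · have hs : solScanB (c :: cs) f 0 0 = (g, a, 1 + b) := by
          rw [show solScanB (c :: cs) f 0 0 = solScanB cs f 0 1 from by
            simp [solScanB, hR, hf]]
          rw [solScanB_shift, hS]
          simp
        rw [hs]
        cases arr with
        | nil =>
          have hl : solLoopA (c :: cs) [] f = none := by simp [solLoopA, hR]
          rw [hl, if_pos (by simp only [List.length_nil]; omega)]
        | cons x rest =>
          have hl : solLoopA (c :: cs) (x :: rest) f = solLoopA cs (x :: rest).dropLast f := by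
            simp [solLoopA, hR, hf]
          have hlen : (x :: rest).dropLast.length = rest.length := by simp
          rw [hl, ih, hS, hlen]
          dsimp only
          by_cases hc : rest.length < a + b
          · rw [if_pos hc, if_pos (by simp only [List.length_cons]; omega)]
          · rw [if_neg hc, if_neg (by simp only [List.length_cons]; omega)]
            have e1 : (x :: rest).dropLast.drop a = ((x :: rest).drop a).take (rest.length - a) := by
              rw [List.dropLast_eq_take]
              rw [List.drop_take]
              congr 1
            have e2 : (x :: rest).length - a - (1 + b) = rest.length - a - b := by
              simp; omega
            rw [e1, e2, List.take_take, Nat.min_eq_left (by omega)]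

theorem solution_eq_alt (p : String) (n : Int) (arr : List Int) :
    solution p n arr = solution_alt p n arr := by
  unfold solution solution_alt
  rcases h : solScanB p.toList 1 0 0 with ⟨g, fr, bk⟩
  have hg : g = 1 ∨ g = -1 := by
    have := solScanB_flag p.toList 1 0 0
    rw [h] at this; simpa using this
  rw [solLoopA_eq, h]
  dsimp only
  by_cases hc : arr.length < fr + bk
  · rw [if_pos hc, if_pos hc]
    simp [solFmtA]
  · rw [if_neg hc, if_neg hc]
    have hb : PySem.List.slice arr (some (fr : Int)) (some ((arr.length - bk : Nat) : Int))
        = (arr.drop fr).take (arr.length - fr - bk) := by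
      rw [PySem.List.slice_natCast]
      congr 1
      omega
    rw [hb]
    rcases hg with hg | hg <;> subst hg <;> simp [solFmtA]

-- ===== VERDICT (by name: the statement is the Claim_ definition above) =====
theorem solution_spec : Claim_equal_solution := by
  intro p n arr _
  exact solution_eq_alt p n arr
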